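-- pv_equiv track=rewrite | github.com/Yasmin361/phosco | seq_extract.py | extract_inner_membrane_sequences
-- ===== SOURCE A (Python) =====
-- def extract_inner_membrane_sequences(sequence, topology):
--     """ Extracts continuous amino acid stretches corresponding to 'I' regions in the topology. """
--     if not sequence or not topology:
--         return ["", "", "", ""], [0, 0, 0, 0]
--
--     inner_membrane_regions = []
--     lengths = []
--     current_region = ""
--
--     for i in range(len(topology)):
--         if topology[i] == "I":
--             current_region += sequence[i]  # Add the corresponding amino acid
--         else:
--             if current_region:  # If we have built an 'I' stretch, save it
--                 inner_membrane_regions.append(current_region)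
--                 lengths.append(len(current_region))
--                 current_region = ""  # Reset for next stretch
--
--     if current_region:  # Catch any trailing 'I' regions
--         inner_membrane_regions.append(current_region)
--         lengths.append(len(current_region))
--
--     while len(inner_membrane_regions) < 4:
--         inner_membrane_regions.append("")  # Fill missing regions with empty strings
--         lengths.append(0)
--
--     return inner_membrane_regions[:4], lengths[:4]
-- ===== SOURCE B (Python) =====
-- def extract_inner_membrane_sequences(sequence, topology):
--     """Span-based rewrite: find maximal 'I' runs in the topology and slice the
--     sequence once per run, instead of accumulating character by character."""
--     if not sequence or not topology:
--         return ["", "", "", ""], [0, 0, 0, 0]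
--     regions = []
--     i, n = 0, len(topology)
--     while i < n:
--         if topology[i] == "I":
--             j = i + 1
--             while j < n and topology[j] == "I":
--                 j += 1
--             regions.append(sequence[i:j])
--             i = j
--         else:
--             i += 1
--     regions = (regions + ["", "", "", ""])[:4]
--     return regions, [len(r) for r in regions]
-- ===== Notes on version B (the rewrite author's own statement) =====
-- stated objective: alternative
-- what changed: Replaces the per-character accumulator loop by span detection: maximal 'I' runs in the topology are located and the sequence is sliced once per run, then padded/truncated to 4.
import Mathlib
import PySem

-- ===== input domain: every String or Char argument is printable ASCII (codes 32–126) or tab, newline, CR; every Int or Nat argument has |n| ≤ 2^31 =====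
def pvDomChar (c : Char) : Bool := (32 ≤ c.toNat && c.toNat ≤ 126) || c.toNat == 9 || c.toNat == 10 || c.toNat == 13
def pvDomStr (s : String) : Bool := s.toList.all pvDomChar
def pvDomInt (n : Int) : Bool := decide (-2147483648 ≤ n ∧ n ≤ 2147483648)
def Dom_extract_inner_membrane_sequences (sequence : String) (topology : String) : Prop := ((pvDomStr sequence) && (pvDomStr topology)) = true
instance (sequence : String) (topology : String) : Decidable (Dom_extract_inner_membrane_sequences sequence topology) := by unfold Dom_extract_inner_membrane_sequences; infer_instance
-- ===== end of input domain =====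

-- B replaces A's per-character accumulator loop by span detection (slice one maximal 'I' run at a
-- time); equivalence of the RETURN value on every input where A returns (Pre_ excludes A's IndexError).

-- ===== PORT A =====
-- The for-i loop reads topology[i] and sequence[i] in lockstep, so it is ported as a recursion
-- consuming both char lists together; regions/current are kept as List Char (String.mk at the end).
def pvA_loop : List Char → List Char → List (List Char) → List Int → List Char →
    List (List Char) × List Int × List Char
  | [], _, regions, lengths, cur => (regions, lengths, cur)
  | t :: ts, ss, regions, lengths, cur =>
    if t = 'I' then
      match ss with
      | c :: ss' => pvA_loop ts ss' regions lengths (cur ++ [c])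
      | [] => (regions, lengths, cur)  -- Python raises IndexError here; excluded by Pre_
    else if cur ≠ [] then
      pvA_loop ts (ss.drop 1) (regions ++ [cur]) (lengths ++ [(cur.length : Int)]) []
    else
      pvA_loop ts (ss.drop 1) regions lengths cur

-- the `while len(regions) < 4` loop; it runs at most 4 times, so fuel 4 is exact
def pvA_pad : Nat → List (List Char) → List Int → List (List Char) × List Int
  | 0, regions, lengths => (regions, lengths)
  | fuel + 1, regions, lengths =>
    if regions.length < 4 then pvA_pad fuel (regions ++ [[]]) (lengths ++ [0])
    else (regions, lengths)

def extract_inner_membrane_sequences (sequence : String) (topology : String) :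
    List String × List Int :=
  if sequence = "" ∨ topology = "" then (["", "", "", ""], [0, 0, 0, 0])
  else
    let st := pvA_loop topology.toList sequence.toList [] [] []
    let st2 := if st.2.2 ≠ [] then (st.1 ++ [st.2.2], st.2.1 ++ [(st.2.2.length : Int)])
               else (st.1, st.2.1)
    let st3 := pvA_pad 4 st2.1 st2.2
    ((st3.1.take 4).map String.mk, st3.2.take 4)

-- ===== PORT B =====
-- Source B's outer while: on an 'I', the inner while advances j over the run (here: takeWhile length),
-- the region is the slice sequence[i:j] (here: take), and both lists are dropped past the run.
-- the outer while advances i by at least 1 each round, so fuel = len(topology) is exact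
def pvB_loop : Nat → List Char → List Char → List (List Char)
  | 0, _, _ => []
  | _, [], _ => []
  | fuel + 1, t :: ts, ss =>
    if t = 'I' then
      let k := (ts.takeWhile (fun c => c = 'I')).length
      ss.take (k + 1) :: pvB_loop fuel (ts.drop k) (ss.drop (k + 1))
    else
      pvB_loop fuel ts (ss.drop 1)

def extract_inner_membrane_sequences_alt (sequence : String) (topology : String) :
    List String × List Int :=
  if sequence = "" ∨ topology = "" then (["", "", "", ""], [0, 0, 0, 0])
  else
    let regions :=
      ((pvB_loop topology.toList.length topology.toList sequence.toList) ++ [[], [], [], []]).take 4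
    (regions.map String.mk, regions.map (fun r => (r.length : Int)))

-- ===== PRECONDITION & SPEC =====
-- Pre_ excludes exactly the inputs where A raises IndexError: both strings nonempty and some 'I'
-- in the topology at an index ≥ len(sequence) (equivalently, an 'I' beyond the sequence's length).
def Pre_extract_inner_membrane_sequences (sequence : String) (topology : String) : Prop :=
  sequence = "" ∨ topology = "" ∨
    (topology.toList.drop sequence.toList.length).all (fun c => c != 'I') = true

instance (sequence : String) (topology : String) :
    Decidable (Pre_extract_inner_membrane_sequences sequence topology) := by
  unfold Pre_extract_inner_membrane_sequences; infer_instance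

def pvWitness_extract_inner_membrane_sequences : String × String := ("MKT", "IOI")

def Spec_extract_inner_membrane_sequences (sequence : String) (topology : String)
    (out : List String × List Int) : Prop :=
  out = extract_inner_membrane_sequences_alt sequence topology

instance (sequence : String) (topology : String) (out : List String × List Int) :
    Decidable (Spec_extract_inner_membrane_sequences sequence topology out) := by
  unfold Spec_extract_inner_membrane_sequences; infer_instance

-- ===== CLAIM (what is proved, stated in full; the proofs are below) =====
def Claim_equal_extract_inner_membrane_sequences : Prop :=
  ∀ (sequence : String) (topology : String),
    Dom_extract_inner_membrane_sequences sequence topology →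
    Pre_extract_inner_membrane_sequences sequence topology →
    Spec_extract_inner_membrane_sequences sequence topology
      (extract_inner_membrane_sequences sequence topology)

-- ===== LEMMAS AND PROOFS =====

-- A's loop output, written as a recursion producing the region list directly (proof helper).
def pvGloop : List Char → List Char → List Char → List (List Char)
  | cur, [], _ => if cur = [] then [] else [cur]
  | cur, t :: ts, ss =>
    if t = 'I' then
      match ss with
      | c :: ss' => pvGloop (cur ++ [c]) ts ss'
      | [] => if cur = [] then [] else [cur]
    else if cur = [] then pvGloop [] ts (ss.drop 1)
    else cur :: pvGloop [] ts (ss.drop 1)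

lemma pvA_loop_spec (ts : List Char) : ∀ (ss : List Char) (regions : List (List Char))
    (lengths : List Int) (cur : List Char),
    ((if (pvA_loop ts ss regions lengths cur).2.2 ≠ [] then
        (pvA_loop ts ss regions lengths cur).1 ++ [(pvA_loop ts ss regions lengths cur).2.2]
      else (pvA_loop ts ss regions lengths cur).1),
     (if (pvA_loop ts ss regions lengths cur).2.2 ≠ [] then
        (pvA_loop ts ss regions lengths cur).2.1 ++
          [((pvA_loop ts ss regions lengths cur).2.2.length : Int)]
      else (pvA_loop ts ss regions lengths cur).2.1))
    = (regions ++ pvGloop cur ts ss,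
       lengths ++ (pvGloop cur ts ss).map (fun r => (r.length : Int))) := by
  induction ts with
  | nil =>
    intro ss regions lengths cur
    by_cases h : cur = [] <;> simp [pvA_loop, pvGloop, h]
  | cons t ts ih =>
    intro ss regions lengths cur
    by_cases hI : t = 'I'
    · cases ss with
      | nil =>
        by_cases h : cur = [] <;> simp [pvA_loop, pvGloop, hI, h]
      | cons c ss' =>
        simpa [pvA_loop, pvGloop, hI] using ih ss' regions lengths (cur ++ [c])
    · by_cases h : cur = []
      · simpa [pvA_loop, pvGloop, hI, h] using ih (ss.drop 1) regions lengths []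
      · have h2 := ih (ss.drop 1) (regions ++ [cur]) (lengths ++ [(cur.length : Int)]) []
        rw [Prod.mk.injEq] at h2
        simp only [List.drop_one] at h2
        simp [pvA_loop, pvGloop, hI, h, h2.1, h2.2]

lemma pvB_loop_fuel (fuel : Nat) : ∀ (ts ss : List Char), ts.length ≤ fuel →
    pvB_loop fuel ts ss = pvB_loop ts.length ts ss := by
  induction fuel using Nat.strong_induction_on with
  | _ fuel ih =>
    intro ts ss h
    cases fuel with
    | zero =>
      cases ts with
      | nil => rfl
      | cons t ts' => simp at h
    | succ f =>
      cases ts with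
      | nil => rfl
      | cons t ts' =>
        simp only [List.length_cons] at h ⊢
        by_cases hI : t = 'I'
        · have hk : (List.drop (List.takeWhile (fun c => decide (c = 'I')) ts').length ts').length
              ≤ ts'.length := by rw [List.length_drop]; omega
          simp [pvB_loop, hI]
          rw [ih f (by omega) _ _ (le_trans hk (by omega)), ih ts'.length (by omega) _ _ hk]
        · simp [pvB_loop, hI]
          rw [ih f (by omega) _ _ (by omega)]

lemma pvB_unfold_I (t : Char) (ts ss : List Char) (hI : t = 'I') :
    pvB_loop (t :: ts).length (t :: ts) ss =
      ss.take ((ts.takeWhile (fun c => c = 'I')).length + 1) ::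
        pvB_loop (ts.drop ((ts.takeWhile (fun c => c = 'I')).length)).length
          (ts.drop ((ts.takeWhile (fun c => c = 'I')).length))
          (ss.drop ((ts.takeWhile (fun c => c = 'I')).length + 1)) := by
  simp only [List.length_cons, pvB_loop, hI, if_pos]
  rw [pvB_loop_fuel ts.length _ _ (by rw [List.length_drop]; omega)]

lemma pvB_unfold_nonI (t : Char) (ts ss : List Char) (hI : ¬ t = 'I') :
    pvB_loop (t :: ts).length (t :: ts) ss = pvB_loop ts.length ts (ss.drop 1) := by
  simp [pvB_loop, hI]

lemma pvGloop_spec (ts : List Char) : ∀ (ss cur : List Char),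
    (∀ c ∈ List.drop ss.length ts, c ≠ 'I') →
    pvGloop cur ts ss =
      if cur = [] then pvB_loop ts.length ts ss
      else (cur ++ ss.take ((ts.takeWhile (fun c => c = 'I')).length))
             :: pvB_loop (ts.drop ((ts.takeWhile (fun c => c = 'I')).length)).length
                         (ts.drop ((ts.takeWhile (fun c => c = 'I')).length))
                         (ss.drop ((ts.takeWhile (fun c => c = 'I')).length)) := by
  induction ts with
  | nil =>
    intro ss cur _
    by_cases h : cur = [] <;> simp [pvGloop, pvB_loop, h]
  | cons t ts ih =>
    intro ss cur hC
    by_cases hI : t = 'I'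
    · cases ss with
      | nil =>
        exfalso
        exact hC t (by simp) (by simpa using hI)
      | cons c ss' =>
        have hC' : ∀ d ∈ List.drop ss'.length ts, d ≠ 'I' := by
          intro d hd
          exact hC d (by simpa using hd)
        have hcur : (cur ++ [c]) ≠ [] := by simp
        have hih := ih ss' (cur ++ [c]) hC'
        rw [if_neg hcur] at hih
        by_cases h : cur = []
        · subst h
          simp only [pvGloop, hI, if_true, List.nil_append] at hih ⊢
          rw [hih, pvB_unfold_I 'I' ts (c :: ss') rfl]
          simp
        · rw [if_neg h]
          simp only [pvGloop, hI, if_true] at hih ⊢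
          rw [hih]
          simp [List.takeWhile]
    · have hC' : ∀ d ∈ List.drop (ss.drop 1).length ts, d ≠ 'I' := by
        intro d hd
        apply hC d
        cases ss with
        | nil => simp at hd ⊢; exact .inr hd
        | cons a as => simpa using hd
      have hB := pvB_unfold_nonI t ts ss hI
      have heq := ih (ss.drop 1) [] hC'
      rw [if_pos rfl] at heq
      simp only [List.drop_one, List.length_cons] at heq hB
      by_cases h : cur = []
      · simp [pvGloop, hI, h, heq, hB]
      · simp [pvGloop, hI, h, heq, hB, List.takeWhile]

lemma pvA_pad_snd (fuel : Nat) : ∀ (r : List (List Char)),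
    (pvA_pad fuel r (r.map (fun x => (x.length : Int)))).2 =
      (pvA_pad fuel r (r.map (fun x => (x.length : Int)))).1.map (fun x => (x.length : Int)) := by
  induction fuel with
  | zero => intro r; simp [pvA_pad]
  | succ n ih =>
    intro r
    by_cases h : r.length < 4
    · have := ih (r ++ [[]])
      simpa [pvA_pad, h] using this
    · simp [pvA_pad, h]

lemma pvA_pad_fst (r : List (List Char)) (l : List Int) :
    (pvA_pad 4 r l).1.take 4 = (r ++ [[], [], [], []]).take 4 := by
  match r with
  | [] => simp [pvA_pad]
  | [a] => simp [pvA_pad]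
  | [a, b] => simp [pvA_pad]
  | [a, b, c] => simp [pvA_pad]
  | a :: b :: c :: d :: rest =>
    simp only [pvA_pad, List.length_cons]
    rw [if_neg (by omega)]
    simp

-- ===== VERDICT (by name: the statement is the Claim_ definition above) =====
theorem extract_inner_membrane_sequences_spec : Claim_equal_extract_inner_membrane_sequences := by
  unfold Claim_equal_extract_inner_membrane_sequences
  intro sequence topology _ hPre
  unfold Spec_extract_inner_membrane_sequences
  unfold extract_inner_membrane_sequences extract_inner_membrane_sequences_alt
  by_cases hguard : sequence = "" ∨ topology = ""
  · simp [hguard]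
  · rw [if_neg hguard, if_neg hguard]
    have hC : ∀ c ∈ List.drop sequence.toList.length topology.toList, c ≠ 'I' := by
      rcases hPre with h | h | h
      · exact absurd (.inl h) hguard
      · exact absurd (.inr h) hguard
      · intro c hc
        have := List.all_eq_true.mp h c hc
        simpa using this
    have h1 := pvA_loop_spec topology.toList sequence.toList [] [] []
    have h2 := pvGloop_spec topology.toList sequence.toList [] hC
    rw [if_pos rfl] at h2
    rw [h2] at h1
    simp only [List.nil_append] at h1
    set R := pvB_loop topology.toList.length topology.toList sequence.toList with hR
    have h12 : (if (pvA_loop topology.toList sequence.toList [] [] []).2.2 ≠ [] then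
        ((pvA_loop topology.toList sequence.toList [] [] []).1 ++
           [(pvA_loop topology.toList sequence.toList [] [] []).2.2],
         (pvA_loop topology.toList sequence.toList [] [] []).2.1 ++
           [((pvA_loop topology.toList sequence.toList [] [] []).2.2.length : Int)])
      else ((pvA_loop topology.toList sequence.toList [] [] []).1,
            (pvA_loop topology.toList sequence.toList [] [] []).2.1)) =
        (R, R.map (fun r => (r.length : Int))) := by
      by_cases hc : (pvA_loop topology.toList sequence.toList [] [] []).2.2 = []
      · simpa [hc] using h1
      · simpa [hc] using h1
    dsimp only
    rw [h12]
    rw [Prod.mk.injEq]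
    constructor
    · rw [pvA_pad_fst]
    · rw [pvA_pad_snd 4 R, ← List.map_take,
        pvA_pad_fst R (R.map (fun x => (x.length : Int)))]
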